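-- pv_equiv track=rewrite | github.com/CodeHalwell/digital-cv | utils/chat.py | _compose_retrieval_query
-- ===== SOURCE A (Python) =====
-- from typing import List, Dict, Any, Optional
--
-- def _compose_retrieval_query(
--     message: str, history: Optional[List[Dict[str, Any]]]
-- ) -> str:
--     """Combine current message with recent user turns for retrieval."""
--
--     recent_user_msgs: List[str] = []
--     if history:
--         for item in reversed(history):
--             if not isinstance(item, dict):
--                 continue
--             if item.get("role") == "user":
--                 content = item.get("content", "") or ""
--                 if content.strip():
--                     recent_user_msgs.append(content.strip())
--             if len(recent_user_msgs) >= 2: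
--                 break
--     recent_user_msgs.reverse()
--     if message.strip():
--         recent_user_msgs.append(message.strip())
--     return "\n\n".join(recent_user_msgs)
-- ===== SOURCE B (Python) =====
-- from typing import List, Dict, Any, Optional
--
-- def _compose_retrieval_query(
--     message: str, history: Optional[List[Dict[str, Any]]]
-- ) -> str:
--     """Combine current message with recent user turns for retrieval."""
--     qualifying: List[str] = []
--     for item in (history or []):
--         if isinstance(item, dict) and item.get("role") == "user":
--             content = (item.get("content", "") or "").strip()
--             if content:
--                 qualifying.append(content)
--     parts = qualifying[-2:]
--     current = message.strip()
--     if current: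
--         parts.append(current)
--     return "\n\n".join(parts)
-- ===== Notes on version B (the rewrite author's own statement) =====
-- stated objective: simpler
-- what changed: Replaces A's reversed scan with a counter, early break and final reverse by one forward pass collecting all qualifying user contents, then a [-2:] slice to keep the last two.
import Mathlib
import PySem

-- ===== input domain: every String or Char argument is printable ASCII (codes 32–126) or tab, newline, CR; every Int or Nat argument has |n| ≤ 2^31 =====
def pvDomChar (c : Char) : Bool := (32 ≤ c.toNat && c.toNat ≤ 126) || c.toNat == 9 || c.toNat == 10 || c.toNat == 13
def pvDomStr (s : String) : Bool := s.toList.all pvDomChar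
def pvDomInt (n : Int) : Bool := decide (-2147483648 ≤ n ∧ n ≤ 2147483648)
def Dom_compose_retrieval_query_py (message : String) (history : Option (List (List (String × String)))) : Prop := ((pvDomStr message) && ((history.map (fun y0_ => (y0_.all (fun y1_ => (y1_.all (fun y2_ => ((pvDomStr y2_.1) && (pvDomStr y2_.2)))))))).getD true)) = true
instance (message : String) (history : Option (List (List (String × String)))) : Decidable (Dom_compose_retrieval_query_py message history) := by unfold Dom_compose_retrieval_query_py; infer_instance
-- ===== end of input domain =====

-- B replaces A's reversed early-exit scan (counter, break, final reverse) by one forward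
-- pass collecting every qualifying user content and a [-2:] slice: simpler decomposition.


-- ===== PORT A =====
-- the reversed(history) loop: append stripped user content, break once two are collected
def pvLoopA : List (List (String × String)) → List String → List String
  | [], acc => acc
  | item :: rest, acc =>
    -- isinstance(item, dict) is always true under the type convention
    let acc' := if PySem.Dict.get? (PySem.Dict.mk item) "role" == some "user" then
        -- item.get("content", "") or "" : the 'or ""' is the identity on strings
        (if PySem.Str.strip (PySem.Dict.getD (PySem.Dict.mk item) "content" "") ≠ "" then
          acc ++ [PySem.Str.strip (PySem.Dict.getD (PySem.Dict.mk item) "content" "")] else acc)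
      else acc
    if 2 ≤ acc'.length then acc' else pvLoopA rest acc'

def compose_retrieval_query_py (message : String) (history : Option (List (List (String × String)))) : String :=
  let recent : List String :=
    match history with
    | none => []
    | some h => if h = [] then [] else pvLoopA h.reverse []
  let recent := recent.reverse
  let recent := if PySem.Str.strip message ≠ "" then recent ++ [PySem.Str.strip message] else recent
  PySem.Str.join "\n\n" recent

-- ===== PORT B =====
def compose_retrieval_query_py_alt (message : String) (history : Option (List (List (String × String)))) : String :=
  let qualifying : List String := (history.getD []).foldl (fun acc item =>
      if PySem.Dict.get? (PySem.Dict.mk item) "role" == some "user" then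
        let content := PySem.Str.strip (PySem.Dict.getD (PySem.Dict.mk item) "content" "")
        if content ≠ "" then acc ++ [content] else acc
      else acc) []
  let parts := PySem.List.slice qualifying (some (-2)) none
  let current := PySem.Str.strip message
  let parts := if current ≠ "" then parts ++ [current] else parts
  PySem.Str.join "\n\n" parts

-- ===== PRECONDITION & SPEC =====
def Spec_compose_retrieval_query_py (message : String) (history : Option (List (List (String × String)))) (out : String) : Prop := out = compose_retrieval_query_py_alt message history
instance (message : String) (history : Option (List (List (String × String)))) (out : String) : Decidable (Spec_compose_retrieval_query_py message history out) := by unfold Spec_compose_retrieval_query_py; infer_instance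

-- ===== CLAIM (what is proved, stated in full; the proofs are below) =====
def Claim_equal_compose_retrieval_query_py : Prop := ∀ (message : String) (history : Option (List (List (String × String)))), Dom_compose_retrieval_query_py message history → Spec_compose_retrieval_query_py message history (compose_retrieval_query_py message history)

-- ===== LEMMAS AND PROOFS =====

-- the per-item filter both loops apply
def pvF (item : List (String × String)) : Option String :=
  if PySem.Dict.get? (PySem.Dict.mk item) "role" == some "user" ∧
     PySem.Str.strip (PySem.Dict.getD (PySem.Dict.mk item) "content" "") ≠ "" then
    some (PySem.Str.strip (PySem.Dict.getD (PySem.Dict.mk item) "content" ""))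
  else none

theorem pvStep (item : List (String × String)) (acc : List String) :
    (if PySem.Dict.get? (PySem.Dict.mk item) "role" == some "user" then
        (if PySem.Str.strip (PySem.Dict.getD (PySem.Dict.mk item) "content" "") ≠ "" then
          acc ++ [PySem.Str.strip (PySem.Dict.getD (PySem.Dict.mk item) "content" "")] else acc)
      else acc) = acc ++ (pvF item).toList := by
  by_cases hr : PySem.Dict.get? (PySem.Dict.mk item) "role" == some "user"
  · by_cases hc : PySem.Str.strip (PySem.Dict.getD (PySem.Dict.mk item) "content" "") ≠ ""
    · simp [pvF, hr, hc]
    · simp only [ne_eq, Decidable.not_not] at hc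
      simp [pvF, hr, hc]
  · simp [pvF, hr]

theorem pvLoopA_eq (l : List (List (String × String))) (acc : List String)
    (h : acc.length ≤ 1) :
    pvLoopA l acc = acc ++ (l.filterMap pvF).take (2 - acc.length) := by
  induction l generalizing acc with
  | nil => simp [pvLoopA]
  | cons item rest ih =>
    simp only [pvLoopA]
    rw [pvStep, List.filterMap_cons]
    cases hv : pvF item with
    | none =>
      simp only [Option.toList_none, List.append_nil]
      rw [if_neg (by omega), ih _ h]
    | some c =>
      simp only [Option.toList_some]
      by_cases h1 : acc.length = 1
      · rw [if_pos (by simp [h1])]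
        have h2 : 2 - acc.length = 1 := by omega
        simp [h2]
      · have h0 : acc.length = 0 := by omega
        have hnil : acc = [] := List.eq_nil_of_length_eq_zero h0
        subst hnil
        rw [if_neg (by simp), ih _ (by simp)]
        simp

theorem pvFold_eq (l : List (List (String × String))) (acc : List String) :
    l.foldl (fun acc item =>
      if PySem.Dict.get? (PySem.Dict.mk item) "role" == some "user" then
        let content := PySem.Str.strip (PySem.Dict.getD (PySem.Dict.mk item) "content" "")
        if content ≠ "" then acc ++ [content] else acc
      else acc) acc = acc ++ l.filterMap pvF := by
  induction l generalizing acc with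
  | nil => simp
  | cons item rest ih =>
    simp only [List.foldl_cons]
    rw [pvStep, ih, List.filterMap_cons]
    cases hv : pvF item with
    | none => simp
    | some c => simp

theorem pvRevTake (q : List String) :
    ((q.reverse.take 2).reverse) = q.drop (q.length - 2) := by
  rw [List.take_reverse, List.reverse_reverse]

theorem compose_retrieval_query_py_eq (message : String)
    (history : Option (List (List (String × String)))) :
    compose_retrieval_query_py message history = compose_retrieval_query_py_alt message history := by
  simp only [compose_retrieval_query_py, compose_retrieval_query_py_alt]
  have hrec : (match history with
      | none => ([] : List String)
      | some h => if h = [] then [] else pvLoopA h.reverse []).reverse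
      = PySem.List.slice ((history.getD []).filterMap pvF) (some (-2)) none := by
    rw [PySem.List.slice_from_neg_ofNat _ 2 (by omega)]
    cases history with
    | none => simp
    | some h =>
      by_cases hh : h = []
      · simp [hh]
      · simp only [hh, Option.getD_some]
        rw [pvLoopA_eq _ _ (by simp), List.nil_append]
        have : h.reverse.filterMap pvF = (h.filterMap pvF).reverse := by
          simp [List.filterMap_reverse]
        rw [this]
        simpa using pvRevTake (h.filterMap pvF)
  rw [pvFold_eq, List.nil_append, hrec]

-- ===== VERDICT (by name: the statement is the Claim_ definition above) =====
theorem compose_retrieval_query_py_spec : Claim_equal_compose_retrieval_query_py := by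
  intro message history _
  exact compose_retrieval_query_py_eq message history
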